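-- pv_equiv track=rewrite | github.com/steventan0110/align-filter | util/filter/file_stats.py | cons_rep
-- ===== SOURCE A (Python) =====
-- import string
--
-- def cons_rep(en, cons_word, cons_char):
-- 	clean_text = ""
-- 	for char in en:
-- 		if char not in string.punctuation:
-- 			clean_text += char
-- 	words = clean_text.split(' ')
-- 	for i in range(len(words)-1):
-- 		if words[i] == words[i+1]:
-- 			cons_word += 1
-- 			break
-- 	clean_char = ""
-- 	for tok in en:
-- 		if not ((tok in string.punctuation) or (tok in string.whitespace) or tok.isnumeric()):
-- 			clean_char += tok
-- 	for i in range(len(clean_char)-2):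
-- 		# 2 consecutive char is not rare, so only count 3 consecutive chars
-- 		if clean_char[i] == clean_char[i+1] and clean_char[i] == clean_char[i+2]:
-- 			cons_char += 1
-- 			break
-- 	return cons_word, cons_char
-- ===== SOURCE B (Python) =====
-- import string
--
-- def cons_rep(en, cons_word, cons_char):
--     # Single pass over en: no intermediate cleaned strings, no split, no index loops.
--     word_flag = False
--     char_flag = False
--     prev_word = None   # last completed word (clean text split on ' ')
--     cur = ""           # word currently being built
--     c1 = c2 = None     # last two chars kept for the triple-repeat check
--     for ch in en:
--         if ch in string.punctuation:
--             continue
--         if ch == ' ':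
--             if prev_word is not None and prev_word == cur:
--                 word_flag = True
--             prev_word, cur = cur, ""
--         else:
--             cur += ch
--         if not (ch in string.whitespace or ch.isnumeric()):
--             if c1 == ch and c2 == ch:
--                 char_flag = True
--             c2, c1 = c1, ch
--     if prev_word is not None and prev_word == cur:
--         word_flag = True
--     return cons_word + (1 if word_flag else 0), cons_char + (1 if char_flag else 0)
-- ===== Notes on version B (the rewrite author's own statement) =====
-- stated objective: alternative
-- what changed: Replaces A's four separate passes (two filtered string builds, a split, and two index loops with break) by one single left-to-right scan of the input that tracks the current and previous word and the last two kept characters, building no intermediate strings or word list.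
import Mathlib
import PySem

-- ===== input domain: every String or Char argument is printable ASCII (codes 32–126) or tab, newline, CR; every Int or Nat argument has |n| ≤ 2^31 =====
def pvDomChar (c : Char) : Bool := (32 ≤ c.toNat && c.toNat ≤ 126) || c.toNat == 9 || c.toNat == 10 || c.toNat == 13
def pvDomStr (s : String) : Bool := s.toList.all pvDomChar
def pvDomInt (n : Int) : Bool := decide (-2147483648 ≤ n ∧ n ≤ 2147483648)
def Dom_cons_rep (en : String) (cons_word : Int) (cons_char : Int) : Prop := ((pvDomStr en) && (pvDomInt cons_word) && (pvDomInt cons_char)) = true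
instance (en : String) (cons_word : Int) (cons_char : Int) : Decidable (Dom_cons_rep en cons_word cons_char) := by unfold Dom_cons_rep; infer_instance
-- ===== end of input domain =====

-- B replaces A's multiple passes (two filtered string builds, a split and two index loops)
-- by one single left-to-right scan tracking the current/previous word and the last two kept
-- characters; objective: alternative (same asymptotic cost).

-- ===== PORT A =====
-- string.punctuation (CPython literal)
def pyPunct (c : Char) : Bool := "!\"#$%&'()*+,-./:;<=>?@[\\]^_`{|}~".toList.contains c
-- string.whitespace = ' \t\n\r\x0b\x0c'
def pyWs (c : Char) : Bool := [' ', '\t', '\n', '\r', Char.ofNat 11, Char.ofNat 12].contains c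
-- tok.isnumeric() for a one-character token: exact on the printable-ASCII domain
def pyNum (c : Char) : Bool := '0' ≤ c && c ≤ '9'

-- head-map helper used by the hand-ported split
def mapHead (f : List Char → List Char) : List (List Char) → List (List Char)
  | [] => []
  | w :: ws => f w :: ws

-- hand port of Python's clean_text.split(' '): cut at EVERY space, keep empty pieces
-- (''.split(' ') = ['']); exact for any string
def splitSp : List Char → List (List Char)
  | [] => [[]]
  | c :: t => if c = ' ' then [] :: splitSp t else mapHead (c :: ·) (splitSp t)

-- A's first index loop with break: first adjacent equal pair of words
def aWordLoop : List (List Char) → Bool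
  | a :: b :: t => if a = b then true else aWordLoop (b :: t)
  | _ => false

-- A's second index loop with break: first triple of equal consecutive chars
def aCharLoop : List Char → Bool
  | a :: b :: c :: t => if a = b ∧ a = c then true else aCharLoop (b :: c :: t)
  | _ => false

def cons_rep (en : String) (cons_word : Int) (cons_char : Int) : Int × Int :=
  let clean_text := en.toList.foldl (fun acc c => if pyPunct c then acc else acc ++ [c]) []
  let words := splitSp clean_text
  let cons_word' := if aWordLoop words then cons_word + 1 else cons_word
  let clean_char := en.toList.foldl
    (fun acc c => if pyPunct c || pyWs c || pyNum c then acc else acc ++ [c]) []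
  let cons_char' := if aCharLoop clean_char then cons_char + 1 else cons_char
  (cons_word', cons_char')

-- ===== PORT B =====
structure BState where
  wf   : Bool                 -- word_flag
  prev : Option (List Char)   -- prev_word (none = Python None)
  cur  : List Char            -- word currently being built
  c2   : Option Char          -- second-to-last kept char
  c1   : Option Char          -- last kept char
  cf   : Bool                 -- char_flag

def bStep (s : BState) (ch : Char) : BState :=
  if pyPunct ch then s
  else
    let s1 : BState :=
      if ch = ' ' then
        { s with wf := s.wf || (s.prev.isSome && s.prev == some s.cur),
                 prev := some s.cur, cur := [] }
      else { s with cur := s.cur ++ [ch] }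
    if pyWs ch || pyNum ch then s1
    else { s1 with cf := s1.cf || (s1.c1 == some ch && s1.c2 == some ch),
                   c2 := s1.c1, c1 := some ch }

def cons_rep_alt (en : String) (cons_word : Int) (cons_char : Int) : Int × Int :=
  let s := en.toList.foldl bStep ⟨false, none, [], none, none, false⟩
  let word_flag := s.wf || (s.prev.isSome && s.prev == some s.cur)
  (cons_word + (if word_flag then 1 else 0), cons_char + (if s.cf then 1 else 0))

-- ===== PRECONDITION & SPEC =====
def Spec_cons_rep (en : String) (cons_word : Int) (cons_char : Int) (out : Int × Int) : Prop := out = cons_rep_alt en cons_word cons_char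
instance (en : String) (cons_word : Int) (cons_char : Int) (out : Int × Int) : Decidable (Spec_cons_rep en cons_word cons_char out) := by unfold Spec_cons_rep; infer_instance

-- ===== CLAIM (what is proved, stated in full; the proofs are below) =====
def Claim_equal_cons_rep : Prop := ∀ (en : String) (cons_word : Int) (cons_char : Int), Dom_cons_rep en cons_word cons_char → Spec_cons_rep en cons_word cons_char (cons_rep en cons_word cons_char)

-- ===== LEMMAS AND PROOFS =====

theorem foldl_filter_append (p : Char → Bool) (l : List Char) (acc : List Char) :
    l.foldl (fun acc c => if p c then acc else acc ++ [c]) acc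
      = acc ++ l.filter (fun c => !p c) := by
  induction l generalizing acc with
  | nil => simp
  | cons c t ih => by_cases h : p c <;> simp [List.foldl_cons, h, ih]

-- the char-side state machine of B, extracted (flag only)
def charRun : Option Char → Option Char → Bool → List Char → Bool
  | _, _, cf, [] => cf
  | c2, c1, cf, c :: t => charRun c1 (some c) (cf || (c1 == some c && c2 == some c)) t

-- the same machine carrying its whole state
def charRunT : Option Char → Option Char → Bool → List Char → Option Char × Option Char × Bool
  | c2, c1, cf, [] => (c2, c1, cf)
  | c2, c1, cf, c :: t => charRunT c1 (some c) (cf || (c1 == some c && c2 == some c)) t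

theorem charRunT_cf (cs : List Char) : ∀ (c2 c1 : Option Char) (cf : Bool),
    (charRunT c2 c1 cf cs).2.2 = charRun c2 c1 cf cs := by
  induction cs with
  | nil => intro c2 c1 cf; rfl
  | cons c t ih => intro c2 c1 cf; simp [charRunT, charRun, ih]

theorem charRun_some (t : List Char) : ∀ (a b : Char) (cf : Bool),
    charRun (some a) (some b) cf t = (cf || aCharLoop (a :: b :: t)) := by
  induction t with
  | nil => intro a b cf; simp [charRun, aCharLoop]
  | cons c t ih =>
    intro a b cf
    simp only [charRun, ih, aCharLoop]
    by_cases h1 : a = b <;> by_cases h2 : a = c <;> by_cases h3 : b = c <;>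
      simp_all <;>
      first
        | simp [beq_eq_false_iff_ne.mpr h3]
        | simp [beq_eq_false_iff_ne.mpr h2]

theorem charRun_init (cs : List Char) : charRun none none false cs = aCharLoop cs := by
  match cs with
  | [] => rfl
  | [a] => rfl
  | a :: b :: t => simp [charRun, charRun_some]

def keepChar (c : Char) : Bool := !(pyPunct c || pyWs c || pyNum c)

theorem foldl_bStep_char (l : List Char) : ∀ (s : BState),
    ((l.foldl bStep s).c2, (l.foldl bStep s).c1, (l.foldl bStep s).cf)
      = charRunT s.c2 s.c1 s.cf (l.filter keepChar) := by
  induction l with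
  | nil => intro s; rfl
  | cons c t ih =>
    intro s
    rw [List.foldl_cons, List.filter_cons]
    by_cases hp : pyPunct c
    · have hk : keepChar c = false := by simp [keepChar, hp]
      have hb : bStep s c = s := by simp [bStep, hp]
      rw [hk, hb]; simpa using ih s
    · by_cases hw : (pyWs c || pyNum c) = true
      · have hk : keepChar c = false := by
          cases hws : pyWs c <;> cases hnum : pyNum c <;> simp_all [keepChar]
        rw [hk]
        by_cases hs : c = ' '
        · have e1 : pyPunct ' ' = false := by decide
          have e2 : pyWs ' ' = true := by decide
          subst hs
          have hb : bStep s ' ' = { s with wf := s.wf || (s.prev.isSome && s.prev == some s.cur), prev := some s.cur, cur := [] } := by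
            simp [bStep, e1, e2]
          rw [hb]; simpa using ih _
        · have hb : bStep s c = { s with cur := s.cur ++ [c] } := by
            simp [bStep, hp, hw, hs]
          rw [hb]; simpa using ih _
      · have hk : keepChar c = true := by
          simp only [keepChar, hp, Bool.false_or]
          simpa using hw
        rw [hk]
        have hb : bStep s c = { s with cur := s.cur ++ [c], c2 := s.c1, c1 := some c, cf := s.cf || (s.c1 == some c && s.c2 == some c) } := by
          have hs : ¬ c = ' ' := by
            intro h; exact hw (by subst h; decide)
          simp [bStep, hp, hw, hs]
        rw [hb]
        simpa [charRunT] using ih _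

theorem cf_eq (l : List Char) :
    (l.foldl bStep ⟨false, none, [], none, none, false⟩).cf
      = aCharLoop (l.filter keepChar) := by
  have h := congrArg (fun p => p.2.2) (foldl_bStep_char l ⟨false, none, [], none, none, false⟩)
  simp only at h
  rw [h, charRunT_cf, charRun_init]

-- the word-side state machine of B, extracted
def wordRun : Bool → Option (List Char) → List Char → List Char →
    Bool × Option (List Char) × List Char
  | wf, prev, cur, [] => (wf, prev, cur)
  | wf, prev, cur, c :: t =>
    if c = ' ' then wordRun (wf || (prev.isSome && prev == some cur)) (some cur) [] t
    else wordRun wf prev (cur ++ [c]) t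

def finFlag : Bool × Option (List Char) × List Char → Bool
  | (wf, p, c) => wf || (p.isSome && p == some c)

def optAdj : Option (List Char) → List (List Char) → Bool
  | none, ws => aWordLoop ws
  | some p, ws => aWordLoop (p :: ws)

theorem mapHead_mapHead (f g : List Char → List Char) (ws : List (List Char)) :
    mapHead f (mapHead g ws) = mapHead (fun w => f (g w)) ws := by
  cases ws <;> rfl

theorem mapHead_congr (f g : List Char → List Char) (h : ∀ w, f w = g w)
    (ws : List (List Char)) : mapHead f ws = mapHead g ws := by
  cases ws <;> simp [mapHead, h]

theorem mapHead_id (ws : List (List Char)) : mapHead (fun w => w) ws = ws := by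
  cases ws <;> rfl

theorem splitSp_ne_nil (cs : List Char) : splitSp cs ≠ [] := by
  cases cs with
  | nil => simp [splitSp]
  | cons c t =>
    by_cases h : c = ' ' <;> simp [splitSp, h]
    cases ht : splitSp t with
    | nil => exact absurd ht (splitSp_ne_nil t)
    | cons w ws => simp [mapHead]

theorem wordRun_finFlag (cs : List Char) : ∀ (wf : Bool) (prev : Option (List Char)) (cur : List Char),
    finFlag (wordRun wf prev cur cs)
      = (wf || optAdj prev (mapHead (cur ++ ·) (splitSp cs))) := by
  induction cs with
  | nil =>
    intro wf prev cur
    cases prev with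
    | none => simp [wordRun, finFlag, splitSp, mapHead, optAdj, aWordLoop]
    | some p =>
      by_cases h : p = cur <;>
        simp [wordRun, finFlag, splitSp, mapHead, optAdj, aWordLoop, h]
  | cons c t ih =>
    intro wf prev cur
    by_cases hs : c = ' '
    · subst hs
      rw [wordRun, if_pos rfl, ih]
      have h1 : mapHead (([] : List Char) ++ ·) (splitSp t) = splitSp t := by
        rw [mapHead_congr _ (fun w => w) (by simp), mapHead_id]
      have h2 : mapHead (cur ++ ·) (splitSp (' ' :: t)) = cur :: splitSp t := by
        simp [splitSp, mapHead]
      rw [h1, h2]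
      have h3 : optAdj prev (cur :: splitSp t)
          = ((prev.isSome && prev == some cur) || aWordLoop (cur :: splitSp t)) := by
        cases prev with
        | none => simp [optAdj]
        | some p =>
          match ht : splitSp t, splitSp_ne_nil t with
          | w :: ws', _ => by_cases h : p = cur <;> simp [optAdj, aWordLoop, h]
      rw [h3]
      cases prev with
      | none => simp [optAdj]
      | some p => by_cases h : p = cur <;> simp [optAdj, h, Bool.or_assoc]
    · rw [wordRun, if_neg hs, ih]
      have h4 : mapHead ((cur ++ [c]) ++ ·) (splitSp t)
          = mapHead (cur ++ ·) (splitSp (c :: t)) := by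
        simp [splitSp, hs, mapHead_mapHead]
      rw [h4]

theorem foldl_bStep_word (l : List Char) : ∀ (s : BState),
    ((l.foldl bStep s).wf, (l.foldl bStep s).prev, (l.foldl bStep s).cur)
      = wordRun s.wf s.prev s.cur (l.filter (fun c => !pyPunct c)) := by
  induction l with
  | nil => intro s; rfl
  | cons c t ih =>
    intro s
    rw [List.foldl_cons, List.filter_cons]
    by_cases hp : pyPunct c
    · have hb : bStep s c = s := by simp [bStep, hp]
      rw [hb]; simpa [hp] using ih s
    · by_cases hs : c = ' '
      · subst hs
        have h1 : pyPunct ' ' = false := by decide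
        have h2 : (pyWs ' ' || pyNum ' ') = true := by decide
        have hb : bStep s ' ' = { s with wf := s.wf || (s.prev.isSome && s.prev == some s.cur), prev := some s.cur, cur := [] } := by
          simp [bStep, h1, h2]
        rw [hb]
        simpa [h1, wordRun] using ih _
      · by_cases hw : (pyWs c || pyNum c) = true
        · have hb : bStep s c = { s with cur := s.cur ++ [c] } := by
            simp [bStep, hp, hw, hs]
          rw [hb]; simpa [hp, wordRun, hs] using ih _
        · have hb : bStep s c = { s with cur := s.cur ++ [c], c2 := s.c1, c1 := some c, cf := s.cf || (s.c1 == some c && s.c2 == some c) } := by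
            simp [bStep, hp, hw, hs]
          rw [hb]; simpa [hp, wordRun, hs] using ih _

theorem wf_eq (l : List Char) :
    (let s := l.foldl bStep ⟨false, none, [], none, none, false⟩
     s.wf || (s.prev.isSome && s.prev == some s.cur))
      = aWordLoop (splitSp (l.filter (fun c => !pyPunct c))) := by
  have h := foldl_bStep_word l ⟨false, none, [], none, none, false⟩
  have h2 : (let s := l.foldl bStep ⟨false, none, [], none, none, false⟩
      s.wf || (s.prev.isSome && s.prev == some s.cur))
      = finFlag (wordRun false none [] (l.filter (fun c => !pyPunct c))) := by
    rw [← h]; rfl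
  rw [h2, wordRun_finFlag]
  have h1 : mapHead (([] : List Char) ++ ·) (splitSp (l.filter (fun c => !pyPunct c)))
      = splitSp (l.filter (fun c => !pyPunct c)) := by
    rw [mapHead_congr _ (fun w => w) (by simp), mapHead_id]
  simp [optAdj, mapHead_id]

-- ===== VERDICT (by name: the statement is the Claim_ definition above) =====
theorem cons_rep_spec : Claim_equal_cons_rep := by
  intro en cw cc _
  unfold Spec_cons_rep cons_rep cons_rep_alt
  rw [foldl_filter_append, foldl_filter_append]
  have hw := wf_eq en.toList
  have hc := cf_eq en.toList
  simp only [List.nil_append] at *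
  rw [hw, hc]
  have hk : (fun c => !(pyPunct c || pyWs c || pyNum c)) = keepChar := rfl
  rw [hk]
  simp only [Prod.mk.injEq]
  split_ifs <;> omega
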